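-- pv_equiv track=rewrite | github.com/MrBrantCode/unitest_baseline | mut_generate/mist_train_taco/taco_13974/solution.py | count_sequences_with_one_at_k
-- ===== SOURCE A (Python) =====
-- def count_sequences_with_one_at_k(N: int, K: int) -> int:
--     mod = 1000000007
--
--     if K == 1:
--         if N == 1:
--             return 1
--         else:
--             return pow(2, N - 2, mod)
--
--     dp = [[0] * (N + 1) for _ in range(K - 1)]
--
--     for j in range(2, N + 1):
--         dp[0][j] = 1
--
--     for i in range(1, K - 1):
--         cs = [0] * (N + 1)
--         for j in range(1, N + 1):
--             cs[j] = (cs[j - 1] + dp[i - 1][j]) % mod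
--         for j in range(2, N + 1):
--             if j != N - i + 1:
--                 dp[i][j] = (dp[i][j] + dp[i - 1][j]) % mod
--             dp[i][j] = (dp[i][j] + cs[-1] - cs[j]) % mod
--
--     ans = 0
--     for j in range(2, N + 1):
--         ans = (ans + dp[-1][j]) % mod
--
--     if K != N:
--         ans = ans * pow(2, N - K - 1, mod) % mod
--
--     return ans
-- ===== SOURCE B (Python) =====
-- def count_sequences_with_one_at_k(N: int, K: int) -> int:
--     mod = 1000000007
--     if K == 1:
--         return 1 if N == 1 else pow(2, N - 2, mod)
--     if K < 2 or N < K: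
--         return 0
--     # closed form: the DP table is the Catalan (ballot-number) triangle, so the
--     # row sum is C(N+K-2, K-1) - C(N+K-2, K-2); no table is built at all.
--     n, r = N + K - 2, K - 1
--     b1 = 1
--     for i in range(1, r + 1):
--         b1 = b1 * (n - r + i) // i          # b1 = C(n, i) after step i
--     b2 = b1 * r // (n - r + 1)              # C(n, r-1) = C(n, r) * r / (n - r + 1)
--     ans = (b1 - b2) % mod
--     if K != N:
--         ans = ans * pow(2, N - K - 1, mod) % mod
--     return ans
-- ===== Notes on version B (the rewrite author's own statement) =====
-- stated objective: faster
-- what changed: Replaces the O(N*K) dynamic-programming table entirely by a closed-form ballot-number formula C(N+K-2,K-1)-C(N+K-2,K-2) (the DP rows are a Catalan triangle), computed with a single O(K) multiplicative binomial loop, returning 0 directly when the position K exceeds the length N.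
import Mathlib
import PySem

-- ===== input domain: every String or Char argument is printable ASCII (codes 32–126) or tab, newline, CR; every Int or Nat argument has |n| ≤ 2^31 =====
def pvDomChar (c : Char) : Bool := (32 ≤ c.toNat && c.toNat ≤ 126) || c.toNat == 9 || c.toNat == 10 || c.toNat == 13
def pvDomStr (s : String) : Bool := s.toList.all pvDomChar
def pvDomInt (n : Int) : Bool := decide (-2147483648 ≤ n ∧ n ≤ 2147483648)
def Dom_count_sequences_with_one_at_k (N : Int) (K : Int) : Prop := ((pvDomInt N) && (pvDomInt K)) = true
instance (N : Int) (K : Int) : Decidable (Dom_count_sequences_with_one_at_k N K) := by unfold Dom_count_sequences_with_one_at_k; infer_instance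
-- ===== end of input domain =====

-- B replaces A's O(N*K) dynamic-programming table by a closed form: the DP rows form the
-- Catalan (ballot-number) triangle, so the answer is C(N+K-2,K-1)-C(N+K-2,K-2) (times the
-- power factor), computed by one O(K) multiplicative binomial loop; objective: faster.

def pvMod : Int := 1000000007

-- b^e mod m by square-and-multiply (same value as Python's three-argument pow for e ≥ 0, m > 0;
-- written out because PySem.Int.powMod materialises b^e, which is not evaluable for huge e)
def pvPowMod (b : Int) (e : Nat) (m : Int) : Int :=
  if he : e = 0 then 1 % m
  else
    let h := pvPowMod b (e / 2) m
    let h2 := h * h % m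
    if e % 2 = 1 then h2 * (b % m) % m else h2
termination_by e
decreasing_by exact Nat.div_lt_self (Nat.pos_of_ne_zero he) (by omega)

-- pow(2, e, 1000000007): for e < 0 Python returns the modular inverse of 2^(-e); since the modulus
-- is prime and 2 is invertible, that inverse equals (2^(-e) mod p)^(p-2) mod p (Fermat) — exact here.
def pvPow2Mod (e : Int) : Int :=
  if 0 ≤ e then pvPowMod 2 e.toNat pvMod
  else pvPowMod (pvPowMod 2 (-e).toNat pvMod) (pvMod - 2).toNat pvMod

-- Python list indexing and assignment, ported by hand on Array (Python lists are arrays with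
-- O(1) access): exact for -len(xs) ≤ i < len(xs); out of that range Python raises IndexError,
-- which A never triggers on inputs admitted by Pre_, so the default 0 there is never returned.
def pvAGet (xs : Array Int) (i : Int) (d : Int) : Int :=
  if h : 0 ≤ i ∧ i.toNat < xs.size then xs[i.toNat]'h.2
  else if h2 : i < 0 ∧ 0 ≤ i + xs.size ∧ (i + xs.size).toNat < xs.size then
    xs[(i + xs.size).toNat]'h2.2.2
  else d

-- A assigns only at nonnegative in-range indices, so the negative wrap is not needed here
def pvASet (xs : Array Int) (i : Int) (v : Int) : Array Int :=
  if h : 0 ≤ i ∧ i.toNat < xs.size then xs.set i.toNat v h.2 else xs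

-- ===== PORT A =====
-- cs = [0]*(N+1); for j in range(1, N+1): cs[j] = (cs[j-1] + dp[i-1][j]) % mod
def pvCsA (N : Int) (prev : Array Int) : Array Int :=
  (PySem.List.pyRange 1 (N + 1) 1).foldl
    (fun c j =>
      pvASet c j ((pvAGet c (j - 1) 0 + pvAGet prev j 0) % pvMod))
    (Array.replicate (N + 1).toNat 0)

-- the body of A's loop 'for i in range(1, K-1)': builds dp[i] from dp[i-1]
def pvStepA (N : Int) (prev : Array Int) (i : Int) : Array Int :=
  let cs := pvCsA N prev
  (PySem.List.pyRange 2 (N + 1) 1).foldl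
    (fun r j =>
      let r1 :=
        if j ≠ N - i + 1 then
          pvASet r j ((pvAGet r j 0 + pvAGet prev j 0) % pvMod)
        else r
      pvASet r1 j
        ((pvAGet r1 j 0 + pvAGet cs (-1) 0 - pvAGet cs j 0) % pvMod))
    (Array.replicate (N + 1).toNat 0)

-- dp[0]: [0]*(N+1) with dp[0][j] = 1 for j in range(2, N+1)
def pvRow0 (N : Int) : Array Int :=
  (PySem.List.pyRange 2 (N + 1) 1).foldl (fun r j => pvASet r j 1)
    (Array.replicate (N + 1).toNat 0)

-- for i in range(1, K-1): build dp[i] from dp[i-1]; dp[-1] is the last row built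
def pvLast (N K : Int) : Array Int :=
  (PySem.List.pyRange 1 (K - 1) 1).foldl (fun prev i => pvStepA N prev i) (pvRow0 N)

-- ans = (ans + dp[-1][j]) % mod over j in range(2, N+1)
def pvAnsA (N K : Int) : Int :=
  let last := pvLast N K
  (PySem.List.pyRange 2 (N + 1) 1).foldl
    (fun a j => (a + pvAGet last j 0) % pvMod) 0

def count_sequences_with_one_at_k (N : Int) (K : Int) : Int :=
  if K = 1 then (if N = 1 then 1 else pvPow2Mod (N - 2))
  else if K ≠ N then pvAnsA N K * pvPow2Mod (N - K - 1) % pvMod else pvAnsA N K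

-- ===== PORT B =====
-- b1 = 1; for i in range(1, r+1): b1 = b1 * (n - r + i) // i
def pvBinomLoop (n r : Int) : Int :=
  (PySem.List.pyRange 1 (r + 1) 1).foldl
    (fun b i => PySem.Int.floordiv (b * (n - r + i)) i) 1

-- b2 = b1 * r // (n - r + 1)
def pvB2 (n r : Int) : Int := PySem.Int.floordiv (pvBinomLoop n r * r) (n - r + 1)

-- ans = (b1 - b2) % mod with n = N+K-2, r = K-1
def pvAnsB (N K : Int) : Int :=
  (pvBinomLoop (N + K - 2) (K - 1) - pvB2 (N + K - 2) (K - 1)) % pvMod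

def count_sequences_with_one_at_k_alt (N : Int) (K : Int) : Int :=
  if K = 1 then (if N = 1 then 1 else pvPow2Mod (N - 2))
  else if K < 2 ∨ N < K then 0
  else if K ≠ N then pvAnsB N K * pvPow2Mod (N - K - 1) % pvMod else pvAnsB N K

-- ===== PRECONDITION & SPEC =====
-- Pre_ excludes exactly the inputs where Python A raises: for K ≤ 0 and N ≥ 2 the table dp has no
-- rows and 'dp[0][j] = 1' raises IndexError.
def Pre_count_sequences_with_one_at_k (N : Int) (K : Int) : Prop := ¬ (K ≤ 0 ∧ 2 ≤ N)
instance (N : Int) (K : Int) : Decidable (Pre_count_sequences_with_one_at_k N K) := by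
  unfold Pre_count_sequences_with_one_at_k; infer_instance

def pvWitness_count_sequences_with_one_at_k : Int × Int := (5, 3)

def Spec_count_sequences_with_one_at_k (N : Int) (K : Int) (out : Int) : Prop :=
  out = count_sequences_with_one_at_k_alt N K
instance (N : Int) (K : Int) (out : Int) : Decidable (Spec_count_sequences_with_one_at_k N K out) := by
  unfold Spec_count_sequences_with_one_at_k; infer_instance

-- ===== CLAIM (what is proved, stated in full; the proofs are below) =====
def Claim_equal_count_sequences_with_one_at_k : Prop :=
  ∀ (N : Int) (K : Int), Dom_count_sequences_with_one_at_k N K →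
    Pre_count_sequences_with_one_at_k N K →
    Spec_count_sequences_with_one_at_k N K (count_sequences_with_one_at_k N K)

-- ===== LEMMAS AND PROOFS =====

-- basic facts about the Array helpers
lemma pvASet_size (xs : Array Int) (i v : Int) : (pvASet xs i v).size = xs.size := by
  unfold pvASet
  split_ifs with h
  · exact Array.size_set h.2
  · rfl

lemma pvASet_oob (xs : Array Int) (i v : Int) (h : (xs.size : Int) ≤ i) : pvASet xs i v = xs := by
  unfold pvASet
  rw [dif_neg (by omega)]

-- reading after writing at a valid nonnegative index
lemma pvAGetSet (xs : Array Int) (j t v : Int) (h0 : 0 ≤ j) (hj : j < (xs.size : Int))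
    (ht : 0 ≤ t) :
    pvAGet (pvASet xs j v) t 0 = if t = j then v else pvAGet xs t 0 := by
  have hjn : j.toNat < xs.size := by omega
  unfold pvASet
  rw [dif_pos ⟨h0, hjn⟩]
  unfold pvAGet
  have hsz : (xs.set j.toNat v hjn).size = xs.size := Array.size_set hjn
  by_cases hv : t.toNat < xs.size
  · rw [dif_pos ⟨ht, by omega⟩, dif_pos ⟨ht, hv⟩, Array.getElem_set]
    by_cases hte : t = j
    · rw [if_pos (by omega : j.toNat = t.toNat), if_pos hte]
    · rw [if_neg (by omega : ¬ j.toNat = t.toNat), if_neg hte]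
  · rw [dif_neg (by omega), dif_neg (by omega), dif_neg (by omega), dif_neg (by omega),
      if_neg (by omega : ¬ t = j)]

lemma pvAGet_replicate (n : Nat) (t : Int) :
    pvAGet (Array.replicate n (0 : Int)) t 0 = 0 := by
  unfold pvAGet
  split_ifs with h1 h2
  · exact Array.getElem_replicate h1.2
  · exact Array.getElem_replicate h2.2.2
  · rfl

-- Python's xs[-1] reads the last element
lemma pvAGet_neg_one (xs : Array Int) (h : 1 ≤ xs.size) :
    pvAGet xs (-1) 0 = pvAGet xs ((xs.size : Int) - 1) 0 := by
  unfold pvAGet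
  rw [dif_neg (by omega), dif_pos (⟨by omega, by omega, by omega⟩ :
      (-1 : Int) < 0 ∧ 0 ≤ -1 + (xs.size : Int) ∧ ((-1 : Int) + xs.size).toNat < xs.size),
    dif_pos (⟨by omega, by omega⟩ :
      0 ≤ (xs.size : Int) - 1 ∧ ((xs.size : Int) - 1).toNat < xs.size)]
  congr 1

-- sum of f over the half-open integer range [a, b)
def pvS (f : Int → Int) (a b : Int) : Int := ((PySem.List.pyRange a b 1).map f).sum

lemma pvS_empty (f : Int → Int) (a b : Int) (h : b ≤ a) : pvS f a b = 0 := by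
  unfold pvS; rw [PySem.List.pyRange_one_eq_nil h]; rfl

lemma pvS_succ (f : Int → Int) (a b : Int) (hab : a ≤ b) :
    pvS f a (b + 1) = pvS f a b + f b := by
  unfold pvS
  rw [PySem.List.pyRange_one_append a b (b + 1) hab (by omega), PySem.List.pyRange_one_singleton]
  simp

lemma pvS_left (f : Int → Int) (a b : Int) (hab : a < b) :
    pvS f a b = f a + pvS f (a + 1) b := by
  unfold pvS
  rw [PySem.List.pyRange_one_cons hab]
  simp

lemma pvS_split (f : Int → Int) (a m b : Int) (h1 : a ≤ m) (h2 : m ≤ b) :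
    pvS f a b = pvS f a m + pvS f m b := by
  unfold pvS
  rw [PySem.List.pyRange_one_append a m b h1 h2]
  simp

lemma pvS_zero (f : Int → Int) (a b : Int) (h : ∀ m, a ≤ m → m < b → f m = 0) :
    pvS f a b = 0 := by
  unfold pvS
  apply List.sum_eq_zero
  intro x hx
  obtain ⟨m, hm, rfl⟩ := List.mem_map.mp hx
  exact h m (PySem.List.mem_pyRange_one.mp hm).1 (PySem.List.mem_pyRange_one.mp hm).2

lemma pvS_mod (f g : Int → Int) (a b : Int)
    (h : ∀ m, a ≤ m → m < b → f m % pvMod = g m % pvMod) :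
    pvS f a b % pvMod = pvS g a b % pvMod := by
  by_cases hab : b ≤ a
  · rw [pvS_empty f a b hab, pvS_empty g a b hab]
  · push_neg at hab
    obtain ⟨n, hn⟩ : ∃ n : Nat, b - a = (n : Int) := ⟨(b - a).toNat, by omega⟩
    induction n generalizing a with
    | zero => omega
    | succ m ih =>
      rw [pvS_left f a b (by omega), pvS_left g a b (by omega)]
      by_cases hm : a + 1 < b
      · have hrec := ih (a + 1) (fun t h1 h2 => h t (by omega) h2) hm (by omega)
        have hf := h a le_rfl (by omega)
        unfold pvMod at hrec hf ⊢
        omega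
      · have hb : b = a + 1 := by omega
        subst hb
        rw [pvS_empty f (a+1) (a+1) le_rfl, pvS_empty g (a+1) (a+1) le_rfl]
        have hf := h a le_rfl (by omega)
        unfold pvMod at hf ⊢
        omega

-- guarded binomial coefficient over Int
def pvC (n k : Int) : Int :=
  if 0 ≤ k ∧ k ≤ n then ((n.toNat.choose k.toNat : Nat) : Int) else 0

-- Pascal's rule for pvC, valid for every integer k when 0 ≤ n
lemma pvC_pascal (n k : Int) (hn : 0 ≤ n) :
    pvC (n + 1) (k + 1) = pvC n (k + 1) + pvC n k := by
  unfold pvC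
  by_cases hk : 0 ≤ k
  · by_cases hkn : k + 1 ≤ n
    · rw [if_pos ⟨by omega, by omega⟩, if_pos ⟨by omega, hkn⟩, if_pos ⟨hk, by omega⟩]
      have h1 : (n + 1).toNat = n.toNat + 1 := by omega
      have h2 : (k + 1).toNat = k.toNat + 1 := by omega
      rw [h1, h2, Nat.choose_succ_succ]
      push_cast; ring
    · by_cases hkn2 : k ≤ n
      · -- k = n
        have he : k = n := by omega
        rw [if_pos ⟨by omega, by omega⟩, if_neg (by omega), if_pos ⟨hk, hkn2⟩]
        have h1 : (n + 1).toNat = n.toNat + 1 := by omega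
        have h2 : (k + 1).toNat = k.toNat + 1 := by omega
        have h3 : k.toNat = n.toNat := by omega
        rw [h1, h2, h3]
        simp [Nat.choose_self]
      · rw [if_neg (by omega), if_neg (by omega), if_neg (by omega)]
        omega
  · by_cases hk1 : k + 1 = 0
    · rw [hk1, if_pos ⟨le_rfl, by omega⟩, if_pos ⟨le_rfl, hn⟩, if_neg (by omega)]
      simp
    · rw [if_neg (by omega), if_neg (by omega), if_neg (by omega)]
      omega

-- central symmetry instance: C(2j, j+1) = C(2j, j-1)
lemma pvC_symm_mid (j : Int) (hj : 0 ≤ j) :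
    pvC (2 * j) (j + 1) = pvC (2 * j) (j - 1) := by
  unfold pvC
  by_cases h1 : j = 0
  · subst h1; norm_num
  · rw [if_pos ⟨by omega, by omega⟩, if_pos ⟨by omega, by omega⟩]
    have h2 : (2 * j).toNat = 2 * j.toNat := by omega
    have h3 : (j + 1).toNat = j.toNat + 1 := by omega
    have h4 : (j - 1).toNat = j.toNat - 1 := by omega
    rw [h2, h3, h4]
    have h5 : j.toNat + 1 ≤ 2 * j.toNat := by omega
    have := Nat.choose_symm h5
    have h6 : 2 * j.toNat - (j.toNat + 1) = j.toNat - 1 := by omega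
    rw [h6] at this
    rw [this]

-- symmetry of the binomial coefficient
lemma pvC_symm (n k : Int) (h0 : 0 ≤ k) (hn : k ≤ n) : pvC n k = pvC n (n - k) := by
  unfold pvC
  rw [if_pos ⟨h0, hn⟩, if_pos ⟨by omega, by omega⟩]
  have h1 : k.toNat ≤ n.toNat := by omega
  have h2 : (n - k).toNat = n.toNat - k.toNat := by omega
  rw [h2, Nat.choose_symm h1]

-- the value at entry t of DP row i (0-based): the Catalan/ballot triangle
def pvF (N i t : Int) : Int :=
  if 2 ≤ t ∧ t ≤ N - i then pvC (i + N - t) i - pvC (i + N - t) (i - 2) else 0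

-- hockey-stick summation of a DP row, by downward induction on t0
lemma pvSumF (N j : Int) (hj : 0 ≤ j) :
    ∀ (n : Nat) (t0 : Int), 2 ≤ t0 → t0 + n = N - j + 1 →
      pvS (pvF N j) t0 (N + 1) = pvC (j + N - t0 + 1) (j + 1) - pvC (j + N - t0 + 1) (j - 1) := by
  intro n
  induction n with
  | zero =>
    intro t0 ht0 hn
    have hz : pvS (pvF N j) t0 (N + 1) = 0 := by
      apply pvS_zero
      intro m hm1 hm2
      unfold pvF
      rw [if_neg (by omega)]
    rw [hz]
    have he : j + N - t0 + 1 = 2 * j := by omega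
    rw [he, pvC_symm_mid j hj]
    omega
  | succ m ih =>
    intro t0 ht0 hn
    rw [pvS_left (pvF N j) t0 (N + 1) (by omega)]
    rw [ih (t0 + 1) (by omega) (by omega)]
    have hF : pvF N j t0 = pvC (j + N - t0) j - pvC (j + N - t0) (j - 2) := by
      unfold pvF
      rw [if_pos ⟨ht0, by omega⟩]
    rw [hF]
    have hp1 : pvC (j + N - t0 + 1) (j + 1) = pvC (j + N - t0) (j + 1) + pvC (j + N - t0) j :=
      pvC_pascal (j + N - t0) j (by omega)
    have hp2 : pvC (j + N - t0 + 1) (j - 1) = pvC (j + N - t0) (j - 1) + pvC (j + N - t0) (j - 2) := by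
      have := pvC_pascal (j + N - t0) (j - 2) (by omega)
      rw [show j - 2 + 1 = j - 1 by ring] at this
      exact this
    have he1 : j + N - (t0 + 1) + 1 = j + N - t0 := by ring
    rw [he1, hp1, hp2]
    ring

-- the one-step recurrence of the DP rows, as an exact integer identity
lemma pvStepF (N i t : Int) (hi : 1 ≤ i) (ht2 : 2 ≤ t) (htN : t ≤ N) :
    (if t ≠ N - i + 1 then pvF N (i - 1) t else 0) + pvS (pvF N (i - 1)) (t + 1) (N + 1)
      = pvF N i t := by
  by_cases h1 : t ≤ N - i
  · rw [if_pos (by omega)]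
    have hsum := pvSumF N (i - 1) (by omega) (N - i + 1 - t).toNat (t + 1) (by omega) (by omega)
    rw [hsum]
    have hF1 : pvF N (i - 1) t = pvC (i + N - t - 1) (i - 1) - pvC (i + N - t - 1) (i - 3) := by
      unfold pvF
      rw [if_pos ⟨ht2, by omega⟩]
      have : i - 1 + N - t = i + N - t - 1 := by ring
      rw [this]
      have : i - 1 - 2 = i - 3 := by ring
      rw [this]
    have he : i - 1 + N - (t + 1) + 1 = i + N - t - 1 := by ring
    rw [hF1, he]
    have hF2 : pvF N i t = pvC (i + N - t) i - pvC (i + N - t) (i - 2) := by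
      unfold pvF
      rw [if_pos ⟨ht2, h1⟩]
    rw [hF2]
    have hp1 : pvC (i + N - t) i = pvC (i + N - t - 1) i + pvC (i + N - t - 1) (i - 1) := by
      have := pvC_pascal (i + N - t - 1) (i - 1) (by omega)
      rw [show i + N - t - 1 + 1 = i + N - t by ring, show i - 1 + 1 = i by ring] at this
      exact this
    have hp2 : pvC (i + N - t) (i - 2) = pvC (i + N - t - 1) (i - 2) + pvC (i + N - t - 1) (i - 3) := by
      have := pvC_pascal (i + N - t - 1) (i - 3) (by omega)
      rw [show i + N - t - 1 + 1 = i + N - t by ring, show i - 3 + 1 = i - 2 by ring] at this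
      exact this
    have hs1 : pvC (i + N - t - 1) (i - 1 + 1) = pvC (i + N - t - 1) i := by
      rw [show i - 1 + 1 = i by ring]
    have hs2 : pvC (i + N - t - 1) (i - 1 - 1) = pvC (i + N - t - 1) (i - 2) := by
      rw [show i - 1 - 1 = i - 2 by ring]
    rw [hs1, hs2, hp1, hp2]
    ring
  · -- t ≥ N - i + 1: everything vanishes
    have hvan : pvS (pvF N (i - 1)) (t + 1) (N + 1) = 0 := by
      apply pvS_zero
      intro m hm1 hm2
      unfold pvF
      rw [if_neg (by omega)]
    have hFi : pvF N i t = 0 := by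
      unfold pvF
      rw [if_neg (by omega)]
    rw [hvan, hFi]
    by_cases h2 : t = N - i + 1
    · rw [if_neg (by omega)]
      omega
    · rw [if_pos (by omega)]
      unfold pvF
      rw [if_neg (by omega)]
      omega

-- characterisation of A's prefix-sum array cs (generalized over the remaining range [a, b))
lemma pvCs_char (prev : Array Int) :
    ∀ (n : Nat) (a b : Int), 1 ≤ a → b - a = n → ∀ (c0 : Array Int), b ≤ (c0.size : Int) →
      pvAGet c0 (a - 1) 0
        = pvS (fun m => pvAGet prev m 0) 1 a % pvMod →
      ((PySem.List.pyRange a b 1).foldl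
          (fun c j => pvASet c j
            ((pvAGet c (j - 1) 0 + pvAGet prev j 0) % pvMod)) c0).size
        = c0.size
      ∧ ∀ t, 0 ≤ t → pvAGet
            ((PySem.List.pyRange a b 1).foldl
              (fun c j => pvASet c j
                ((pvAGet c (j - 1) 0 + pvAGet prev j 0) % pvMod)) c0) t 0
          = if a ≤ t ∧ t < b then pvS (fun m => pvAGet prev m 0) 1 (t + 1) % pvMod
            else pvAGet c0 t 0 := by
  intro n
  induction n with
  | zero =>
    intro a b ha hn c0 hL h0
    rw [PySem.List.pyRange_one_eq_nil (by omega)]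
    exact ⟨rfl, fun t ht => by simp only [List.foldl_nil]; rw [if_neg (by omega)]⟩
  | succ m ih =>
    intro a b ha hn c0 hL h0
    rw [PySem.List.pyRange_one_cons (by omega), List.foldl_cons]
    have hlen1 : (pvASet c0 a
        ((pvAGet c0 (a - 1) 0 + pvAGet prev a 0) % pvMod)).size
        = c0.size := pvASet_size _ _ _
    have hget1 : ∀ t, 0 ≤ t → pvAGet (pvASet c0 a
        ((pvAGet c0 (a - 1) 0 + pvAGet prev a 0) % pvMod)) t 0
        = if t = a then (pvAGet c0 (a - 1) 0 + pvAGet prev a 0) % pvMod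
          else pvAGet c0 t 0 :=
      fun t ht => pvAGetSet c0 a t _ (by omega) (by omega) ht
    have hhead : pvAGet (pvASet c0 a
        ((pvAGet c0 (a - 1) 0 + pvAGet prev a 0) % pvMod)) (a + 1 - 1) 0
        = pvS (fun m => pvAGet prev m 0) 1 (a + 1) % pvMod := by
      rw [show a + 1 - 1 = a by ring, hget1 a (by omega), if_pos rfl, h0,
        pvS_succ (fun m => pvAGet prev m 0) 1 a ha]
      unfold pvMod; omega
    obtain ⟨hlenR, hgetR⟩ := ih (a + 1) b (by omega) (by omega) _ (by omega) hhead
    refine ⟨by rw [hlenR, hlen1], fun t ht => ?_⟩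
    rw [hgetR t ht]
    by_cases h1 : a + 1 ≤ t ∧ t < b
    · rw [if_pos h1, if_pos (by omega)]
    · rw [if_neg h1, hget1 t ht]
      by_cases h2 : a ≤ t ∧ t < b
      · have hta : t = a := by omega
        rw [if_pos h2, if_pos hta, hta, h0,
          pvS_succ (fun m => pvAGet prev m 0) 1 a ha]
        unfold pvMod; omega
      · rw [if_neg h2, if_neg (by omega)]

-- the per-index value A's row loop leaves at index t
def pvAVal (N i : Int) (prevG csG : Int → Int) (csLast : Int) (t : Int) : Int :=
  ((if t ≠ N - i + 1 then ((0 : Int) + prevG t) % pvMod else 0) + csLast - csG t) % pvMod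

-- characterisation of A's second inner loop (generalized over [a, b))
lemma pvRowA_char (N i : Int) (prev cs : Array Int) :
    ∀ (n : Nat) (a b : Int), 0 ≤ a → b - a = n → ∀ (r0 : Array Int), b ≤ (r0.size : Int) →
      (∀ t, a ≤ t → pvAGet r0 t 0 = 0) →
      ((PySem.List.pyRange a b 1).foldl
          (fun r j =>
            let r1 :=
              if j ≠ N - i + 1 then
                pvASet r j
                  ((pvAGet r j 0 + pvAGet prev j 0) % pvMod)
              else r
            pvASet r1 j
              ((pvAGet r1 j 0 + pvAGet cs (-1) 0
                - pvAGet cs j 0) % pvMod)) r0).size = r0.size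
      ∧ ∀ t, 0 ≤ t → pvAGet
            ((PySem.List.pyRange a b 1).foldl
              (fun r j =>
                let r1 :=
                  if j ≠ N - i + 1 then
                    pvASet r j
                      ((pvAGet r j 0 + pvAGet prev j 0) % pvMod)
                  else r
                pvASet r1 j
                  ((pvAGet r1 j 0 + pvAGet cs (-1) 0
                    - pvAGet cs j 0) % pvMod)) r0) t 0
          = if a ≤ t ∧ t < b then
              pvAVal N i (fun m => pvAGet prev m 0)
                (fun m => pvAGet cs m 0) (pvAGet cs (-1) 0) t
            else pvAGet r0 t 0 := by
  intro n
  induction n with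
  | zero =>
    intro a b ha hn r0 hL h0
    rw [PySem.List.pyRange_one_eq_nil (by omega)]
    exact ⟨rfl, fun t ht => by simp only [List.foldl_nil]; rw [if_neg (by omega)]⟩
  | succ m ih =>
    intro a b ha hn r0 hL h0
    rw [PySem.List.pyRange_one_cons (by omega), List.foldl_cons]
    set r1 : Array Int :=
      if a ≠ N - i + 1 then
        pvASet r0 a
          ((pvAGet r0 a 0 + pvAGet prev a 0) % pvMod)
      else r0 with hr1
    have hlen1 : r1.size = r0.size := by
      rw [hr1]; split_ifs
      · exact pvASet_size _ _ _
      · rfl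
    have hr1get : ∀ t, 0 ≤ t → pvAGet r1 t 0
        = if a ≠ N - i + 1 ∧ t = a then
            ((0 : Int) + pvAGet prev a 0) % pvMod
          else pvAGet r0 t 0 := by
      intro t ht
      rw [hr1]
      by_cases hc : a ≠ N - i + 1
      · rw [if_pos hc, pvAGetSet r0 a t _ (by omega) (by omega) ht, h0 a le_rfl]
        by_cases hta : t = a
        · rw [if_pos hta, if_pos (show a ≠ N - i + 1 ∧ t = a from ⟨hc, hta⟩)]
        · rw [if_neg hta, if_neg (show ¬ (a ≠ N - i + 1 ∧ t = a) from fun h => hta h.2)]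
      · rw [if_neg hc, if_neg (show ¬ (a ≠ N - i + 1 ∧ t = a) from fun h => hc h.1)]
    set rs : Array Int := pvASet r1 a
      ((pvAGet r1 a 0 + pvAGet cs (-1) 0
        - pvAGet cs a 0) % pvMod) with hrs
    have hlens : rs.size = r0.size := by rw [hrs, pvASet_size, hlen1]
    have hsget : ∀ t, 0 ≤ t → pvAGet rs t 0
        = if t = a then
            pvAVal N i (fun m => pvAGet prev m 0)
              (fun m => pvAGet cs m 0) (pvAGet cs (-1) 0) a
          else pvAGet r0 t 0 := by
      intro t ht
      rw [hrs, pvAGetSet r1 a t _ (by omega) (by omega) ht]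
      by_cases hta : t = a
      · rw [if_pos hta, if_pos hta]
        unfold pvAVal
        beta_reduce
        rw [hr1get a (by omega)]
        by_cases hc : a ≠ N - i + 1
        · rw [if_pos (show a ≠ N - i + 1 ∧ a = a from ⟨hc, rfl⟩), if_pos hc]
        · rw [if_neg (show ¬ (a ≠ N - i + 1 ∧ a = a) from fun h => hc h.1), if_neg hc,
            h0 a le_rfl]
      · rw [if_neg hta, if_neg hta, hr1get t ht,
          if_neg (show ¬ (a ≠ N - i + 1 ∧ t = a) from fun h => hta h.2)]
    have hszero : ∀ t, a + 1 ≤ t → pvAGet rs t 0 = 0 := by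
      intro t htt
      rw [hsget t (by omega), if_neg (by omega)]
      exact h0 t (by omega)
    obtain ⟨hlenR, hgetR⟩ := ih (a + 1) b (by omega) (by omega) rs (by omega) hszero
    refine ⟨by rw [hlenR, hlens], fun t ht => ?_⟩
    rw [hgetR t ht]
    by_cases h1 : a + 1 ≤ t ∧ t < b
    · rw [if_pos h1, if_pos (by omega)]
    · rw [if_neg h1, hsget t ht]
      by_cases h2 : a ≤ t ∧ t < b
      · have hta : t = a := by omega
        rw [if_pos h2, if_pos hta, hta]
      · rw [if_neg h2, if_neg (by omega)]

-- A's row step, expressed through prefix sums of the previous row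
lemma pvStepA_char (N i : Int) (hN : 2 ≤ N) (prev : Array Int)
    (hlen : (prev.size : Int) = N + 1) :
    ((pvStepA N prev i).size : Int) = N + 1
    ∧ ∀ t, 1 ≤ t → t ≤ N → pvAGet (pvStepA N prev i) t 0
        = if 2 ≤ t then
            ((if t ≠ N - i + 1 then ((0 : Int) + pvAGet prev t 0) % pvMod else 0)
              + pvS (fun m => pvAGet prev m 0) 1 (N + 1) % pvMod
              - pvS (fun m => pvAGet prev m 0) 1 (t + 1) % pvMod) % pvMod
          else 0 := by
  have hLrep : ((Array.replicate (N + 1).toNat (0 : Int)).size : Int) = N + 1 := by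
    simp; omega
  obtain ⟨hcsLen, hcsGet⟩ := pvCs_char prev (N + 1 - 1).toNat 1 (N + 1) le_rfl (by omega)
    (Array.replicate (N + 1).toNat 0) (by omega)
    (by rw [pvAGet_replicate]
        unfold pvS
        rw [PySem.List.pyRange_one_eq_nil le_rfl]
        simp)
  have hcsLen' : ((pvCsA N prev).size : Int) = N + 1 := by
    unfold pvCsA; rw [hcsLen]; exact hLrep
  have hcsN : pvAGet (pvCsA N prev) N 0
      = pvS (fun m => pvAGet prev m 0) 1 (N + 1) % pvMod := by
    unfold pvCsA
    rw [hcsGet N (by omega), if_pos (by omega)]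
  have hlast : pvAGet (pvCsA N prev) (-1) 0
      = pvS (fun m => pvAGet prev m 0) 1 (N + 1) % pvMod := by
    rw [pvAGet_neg_one (pvCsA N prev) (by omega),
      show (((pvCsA N prev).size : Nat) : Int) - 1 = N by omega]
    exact hcsN
  obtain ⟨hALen, hAGet⟩ := pvRowA_char N i prev (pvCsA N prev) (N + 1 - 2).toNat 2 (N + 1)
    (by omega) (by omega) (Array.replicate (N + 1).toNat 0) (by omega)
    (fun t _ => pvAGet_replicate _ t)
  constructor
  · unfold pvStepA
    rw [hALen]
    exact hLrep
  · intro t ht1 htN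
    have hget : pvAGet (pvStepA N prev i) t 0
        = if 2 ≤ t ∧ t < N + 1 then
            pvAVal N i (fun m => pvAGet prev m 0)
              (fun m => pvAGet (pvCsA N prev) m 0)
              (pvAGet (pvCsA N prev) (-1) 0) t
          else pvAGet (Array.replicate (N + 1).toNat 0) t 0 := hAGet t (by omega)
    rw [hget]
    by_cases h2 : 2 ≤ t
    · rw [if_pos ⟨h2, by omega⟩, if_pos h2]
      unfold pvAVal
      beta_reduce
      rw [hlast]
      have hcst : pvAGet (pvCsA N prev) t 0
          = pvS (fun m => pvAGet prev m 0) 1 (t + 1) % pvMod := by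
        unfold pvCsA
        rw [hcsGet t (by omega), if_pos (by omega)]
      rw [hcst]
    · rw [if_neg (by omega), if_neg h2, pvAGet_replicate]

-- the fold over i = i0 .. i0+n-1 of pvStepA preserves the row invariant
lemma pvFoldRows (N : Int) (hN : 2 ≤ N) :
    ∀ (n : Nat) (i0 : Int), 1 ≤ i0 → ∀ (prev : Array Int), ((prev.size : Int) = N + 1) →
      (∀ t, 1 ≤ t → t ≤ N → pvAGet prev t 0 = pvF N (i0 - 1) t % pvMod) →
      (((PySem.List.pyRange i0 (i0 + n) 1).foldl (fun p i => pvStepA N p i) prev).size : Int)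
        = N + 1
      ∧ ∀ t, 1 ≤ t → t ≤ N →
          pvAGet
            ((PySem.List.pyRange i0 (i0 + n) 1).foldl (fun p i => pvStepA N p i) prev) t 0
          = pvF N (i0 + n - 1) t % pvMod := by
  intro n
  induction n with
  | zero =>
    intro i0 hi0 prev hlen hinv
    rw [show i0 + (0 : Nat) = i0 by push_cast; ring, PySem.List.pyRange_one_eq_nil le_rfl]
    exact ⟨hlen, fun t ht1 ht2 => by
      simp only [List.foldl_nil]
      rw [hinv t ht1 ht2]⟩
  | succ m ih =>
    intro i0 hi0 prev hlen hinv
    rw [PySem.List.pyRange_one_cons (by push_cast; omega), List.foldl_cons]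
    obtain ⟨hsLen, hsGet⟩ := pvStepA_char N i0 hN prev hlen
    have hnext : ∀ t, 1 ≤ t → t ≤ N →
        pvAGet (pvStepA N prev i0) t 0 = pvF N (i0 + 1 - 1) t % pvMod := by
      intro t ht1 ht2
      rw [hsGet t ht1 ht2, show i0 + 1 - 1 = i0 by ring]
      by_cases h2 : 2 ≤ t
      · rw [if_pos h2]
        -- rewrite prefix sums of stored (reduced) values by prefix sums of pvF
        have hmodS : ∀ b, 1 ≤ b → b ≤ N + 1 →
            pvS (fun m => pvAGet prev m 0) 1 b % pvMod
              = pvS (pvF N (i0 - 1)) 1 b % pvMod := by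
          intro b hb1 hb2
          apply pvS_mod
          intro mm hm1 hm2
          rw [hinv mm hm1 (by omega)]
          unfold pvMod; omega
        rw [hmodS (N + 1) (by omega) le_rfl, hmodS (t + 1) (by omega) (by omega)]
        have hsplit : pvS (pvF N (i0 - 1)) 1 (N + 1)
            = pvS (pvF N (i0 - 1)) 1 (t + 1) + pvS (pvF N (i0 - 1)) (t + 1) (N + 1) :=
          pvS_split _ 1 (t + 1) (N + 1) (by omega) (by omega)
        have hstep := pvStepF N i0 t hi0 h2 ht2
        set A' := pvS (pvF N (i0 - 1)) 1 (t + 1) with hA'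
        set C' := pvS (pvF N (i0 - 1)) (t + 1) (N + 1) with hC'
        by_cases hc : t ≠ N - i0 + 1
        · rw [if_pos hc]
          rw [if_pos hc] at hstep
          rw [hinv t ht1 ht2, ← hstep, hsplit]
          set f := pvF N (i0 - 1) t
          unfold pvMod; omega
        · rw [if_neg hc]
          rw [if_neg hc] at hstep
          rw [← hstep, hsplit]
          unfold pvMod; omega
      · rw [if_neg h2]
        unfold pvF
        rw [if_neg (by omega)]
        decide
    have := ih (i0 + 1) (by omega) (pvStepA N prev i0) hsLen hnext
    rw [show i0 + 1 + (m : Int) = i0 + ((m : Nat) + 1 : Nat) by push_cast; ring] at this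
    obtain ⟨h1, h2⟩ := this
    exact ⟨h1, fun t ht1 ht2 => h2 t ht1 ht2⟩

-- the initial row dp[0]
lemma pvRow0_char (N : Int) :
    ∀ (n : Nat) (a : Int), 2 ≤ a → ∀ (r0 : Array Int),
      (((PySem.List.pyRange a (a + n) 1).foldl (fun r j => pvASet r j 1) r0).size
        = r0.size)
      ∧ ∀ t, 0 ≤ t → t < (r0.size : Int) →
          pvAGet
            ((PySem.List.pyRange a (a + n) 1).foldl (fun r j => pvASet r j 1) r0) t 0
          = if a ≤ t ∧ t < a + n then 1 else pvAGet r0 t 0 := by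
  intro n
  induction n with
  | zero =>
    intro a ha r0
    rw [show a + (0 : Nat) = a by push_cast; ring, PySem.List.pyRange_one_eq_nil le_rfl]
    exact ⟨rfl, fun t ht1 ht2 => by simp only [List.foldl_nil]; rw [if_neg (by omega)]⟩
  | succ m ih =>
    intro a ha r0
    by_cases hin : a < (r0.size : Int)
    · rw [PySem.List.pyRange_one_cons (by push_cast; omega), List.foldl_cons]
      obtain ⟨hlenR, hgetR⟩ := ih (a + 1) (by omega) (pvASet r0 a 1)
      have hlen1 : (pvASet r0 a 1).size = r0.size :=
        pvASet_size _ _ _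
      rw [show a + ((m : Nat) + 1 : Nat) = a + 1 + (m : Int) by push_cast; ring]
      refine ⟨by rw [hlenR, hlen1], fun t ht1 ht2 => ?_⟩
      rw [hgetR t ht1 (by omega)]
      by_cases h1 : a + 1 ≤ t ∧ t < a + 1 + m
      · rw [if_pos h1, if_pos (by omega)]
      · rw [if_neg h1, pvAGetSet r0 a t 1 (by omega) hin ht1]
        by_cases h2 : t = a
        · rw [if_pos h2, if_pos (by omega)]
        · rw [if_neg h2, if_neg (by omega)]
    · -- a out of range: every pySetD in the fold is at an index ≥ length, hence id
      have hid : ∀ (b : Nat) (aa : Int), (r0.size : Int) ≤ aa →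
          ((PySem.List.pyRange aa (aa + b) 1).foldl (fun r j => pvASet r j 1) r0)
            = r0 := by
        intro b
        induction b with
        | zero =>
          intro aa haa
          rw [show aa + (0 : Nat) = aa by push_cast; ring, PySem.List.pyRange_one_eq_nil le_rfl]
          rfl
        | succ bb ihh =>
          intro aa haa
          rw [PySem.List.pyRange_one_cons (by push_cast; omega), List.foldl_cons]
          have hset : pvASet r0 aa 1 = r0 := pvASet_oob r0 aa 1 (by omega)
          rw [hset, show aa + ((bb : Nat) + 1 : Nat) = aa + 1 + (bb : Int) by push_cast; ring]
          exact ihh (aa + 1) (by omega)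
      rw [hid ((m : Nat) + 1) a (by omega)]
      exact ⟨rfl, fun t ht1 ht2 => by rw [if_neg (by omega)]⟩

-- the modular-sum fold computing ans
lemma pvAnsFold (g : Int → Int) :
    ∀ (n : Nat) (a s : Int), s % pvMod = s →
      (PySem.List.pyRange a (a + n) 1).foldl (fun acc j => (acc + g j) % pvMod) s
        = (s + pvS g a (a + n)) % pvMod := by
  intro n
  induction n with
  | zero =>
    intro a s hs
    rw [show a + (0 : Nat) = a by push_cast; ring, PySem.List.pyRange_one_eq_nil le_rfl,
      pvS_empty g a a le_rfl]
    simpa using hs.symm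
  | succ m ih =>
    intro a s hs
    rw [PySem.List.pyRange_one_cons (by push_cast; omega), List.foldl_cons]
    have hrec := ih (a + 1) ((s + g a) % pvMod) (by unfold pvMod; omega)
    rw [show a + ((m : Nat) + 1 : Nat) = a + 1 + (m : Int) by push_cast; ring, hrec,
      pvS_left g a (a + 1 + m) (by omega)]
    set X := pvS g (a + 1) (a + 1 + (m : Int))
    unfold pvMod; omega

-- evaluation of B's multiplicative binomial loop: value after u steps is C(m+u, u)
lemma pvBinomLoop_eval (n r : Int) (hr : 1 ≤ r) (hm : 1 ≤ n - r) :
    ∀ (u : Nat), (u : Int) ≤ r →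
      (PySem.List.pyRange 1 ((u : Int) + 1) 1).foldl
          (fun b i => PySem.Int.floordiv (b * (n - r + i)) i) 1
        = (((n - r).toNat + u).choose u : Int) := by
  intro u
  induction u with
  | zero =>
    intro hu
    rw [show ((0 : Nat) : Int) + 1 = 1 by norm_num, PySem.List.pyRange_one_eq_nil le_rfl]
    simp
  | succ v ih =>
    intro hu
    rw [show ((v + 1 : Nat) : Int) + 1 = ((v : Int) + 1) + 1 by push_cast; ring,
      PySem.List.pyRange_one_succ_right (by omega), List.foldl_append, List.foldl_cons,
      List.foldl_nil, ih (by push_cast at hu ⊢; omega)]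
    set mh := (n - r).toNat with hmh
    have he1 : n - r + ((v : Int) + 1) = ((mh + v + 1 : Nat) : Int) := by
      push_cast; omega
    rw [he1]
    have hkey : (mh + v).choose v * (mh + v + 1) = (mh + v + 1).choose (v + 1) * (v + 1) := by
      rw [Nat.mul_comm]
      exact Nat.add_one_mul_choose_eq (mh + v) v
    have he2 : (((mh + v).choose v : Nat) : Int) * ((mh + v + 1 : Nat) : Int)
        = (((mh + v + 1).choose (v + 1) : Nat) : Int) * ((v : Int) + 1) := by
      exact_mod_cast hkey
    rw [he2, PySem.Int.floordiv_eq_ediv_of_pos (by omega),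
      Int.mul_ediv_cancel _ (by omega)]
    norm_cast

-- B's two binomials, as pvC values (main case 2 ≤ K ≤ N)
lemma pvBinom_vals (N K : Int) (hK : 2 ≤ K) (hKN : K ≤ N) :
    pvBinomLoop (N + K - 2) (K - 1) = pvC (N + K - 2) (K - 1)
    ∧ PySem.Int.floordiv (pvBinomLoop (N + K - 2) (K - 1) * (K - 1)) (N + K - 2 - (K - 1) + 1)
        = pvC (N + K - 2) (K - 2) := by
  have hm : 1 ≤ N + K - 2 - (K - 1) := by omega
  obtain ⟨w, hw⟩ : ∃ w : Nat, (K - 1).toNat = w + 1 := ⟨(K - 2).toNat, by omega⟩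
  obtain ⟨M, hM⟩ : ∃ M : Nat, (N + K - 2 - (K - 1)).toNat = M := ⟨_, rfl⟩
  have hb1 : pvBinomLoop (N + K - 2) (K - 1) = (((M + (w + 1)).choose (w + 1) : Nat) : Int) := by
    unfold pvBinomLoop
    have := pvBinomLoop_eval (N + K - 2) (K - 1) (by omega) hm (K - 1).toNat (by omega)
    rw [show (((K - 1).toNat : Nat) : Int) + 1 = K - 1 + 1 by omega] at this
    rw [this, hM, hw]
  constructor
  · rw [hb1]
    unfold pvC
    rw [if_pos ⟨by omega, by omega⟩,
      show (N + K - 2).toNat = M + (w + 1) by omega,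
      show (K - 1).toNat = w + 1 from hw]
  · rw [hb1]
    rw [show (N + K - 2 - (K - 1) + 1 : Int) = ((M + 1 : Nat) : Int) by push_cast; omega]
    rw [show (K - 1 : Int) = ((w + 1 : Nat) : Int) by push_cast; omega]
    have hkey : (M + (w + 1)).choose (w + 1) * (w + 1) = (M + (w + 1)).choose w * (M + 1) := by
      have := Nat.choose_succ_right_eq (M + (w + 1)) w
      have he : M + (w + 1) - w = M + 1 := by omega
      rw [he] at this
      exact this
    have hcast : (((M + (w + 1)).choose (w + 1) : Nat) : Int) * ((w + 1 : Nat) : Int)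
        = (((M + (w + 1)).choose w : Nat) : Int) * ((M + 1 : Nat) : Int) := by
      exact_mod_cast hkey
    rw [hcast, PySem.Int.floordiv_eq_ediv_of_pos (by exact_mod_cast Nat.succ_pos M),
      Int.mul_ediv_cancel _ (by exact_mod_cast (Nat.succ_pos M).ne')]
    unfold pvC
    rw [if_pos ⟨by omega, by omega⟩,
      show (N + K - 2).toNat = M + (w + 1) by omega,
      show (K - 2).toNat = w by omega]

-- the final A-side sum for 2 ≤ K: Σ_{t=2}^{N} pvF N (K-2) t
lemma pvFinalSum (N K : Int) (hK : 2 ≤ K) (hN : 2 ≤ N) :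
    pvS (pvF N (K - 2)) 2 (N + 1)
      = if K ≤ N + 1 then pvC (N + K - 2) (K - 1) - pvC (N + K - 2) (K - 2) else 0 := by
  by_cases hKN : K ≤ N + 1
  · rw [if_pos hKN]
    have hsum := pvSumF N (K - 2) (by omega) (N - (K - 2) + 1 - 2).toNat 2 le_rfl (by omega)
    rw [hsum]
    have hp1 : pvC (N + K - 2) (K - 1) = pvC (N + K - 3) (K - 1) + pvC (N + K - 3) (K - 2) := by
      have := pvC_pascal (N + K - 3) (K - 2) (by omega)
      rw [show N + K - 3 + 1 = N + K - 2 by ring, show K - 2 + 1 = K - 1 by ring] at this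
      exact this
    have hp2 : pvC (N + K - 2) (K - 2) = pvC (N + K - 3) (K - 2) + pvC (N + K - 3) (K - 3) := by
      have := pvC_pascal (N + K - 3) (K - 3) (by omega)
      rw [show N + K - 3 + 1 = N + K - 2 by ring, show K - 3 + 1 = K - 2 by ring] at this
      exact this
    have he1 : K - 2 + N - 2 + 1 = N + K - 3 := by ring
    have he2 : K - 2 + 1 = K - 1 := by ring
    have he3 : K - 2 - 1 = K - 3 := by ring
    rw [he1, he2, he3, hp1, hp2]
    ring
  · rw [if_neg hKN]
    apply pvS_zero
    intro m hm1 hm2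
    unfold pvF
    rw [if_neg (by omega)]

-- ===== VERDICT (by name: the statement is the Claim_ definition above) =====
theorem count_sequences_with_one_at_k_spec : Claim_equal_count_sequences_with_one_at_k := by
  intro N K _hdom hpre
  unfold Spec_count_sequences_with_one_at_k
  unfold Pre_count_sequences_with_one_at_k at hpre
  unfold count_sequences_with_one_at_k count_sequences_with_one_at_k_alt
  by_cases hK1 : K = 1
  · rw [if_pos hK1, if_pos hK1]
  · rw [if_neg hK1, if_neg hK1]
    by_cases hN2 : 2 ≤ N
    · -- N ≥ 2; by Pre_, K ≥ 1, hence K ≥ 2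
      have hK2 : 2 ≤ K := by omega
      have hLrep : ((Array.replicate (N + 1).toNat (0 : Int)).size : Int) = N + 1 := by
        simp; omega
      obtain ⟨h0len, h0get⟩ := pvRow0_char N (N + 1 - 2).toNat 2 le_rfl
        (Array.replicate (N + 1).toNat 0)
      rw [show (2 : Int) + ((N + 1 - 2).toNat : Int) = N + 1 by omega] at h0len h0get
      have hrow0len : (((pvRow0 N).size : Nat) : Int) = N + 1 := by
        unfold pvRow0; rw [h0len]; exact hLrep
      have hrow0get : ∀ t, 1 ≤ t → t ≤ N →
          pvAGet (pvRow0 N) t 0 = pvF N (1 - 1) t % pvMod := by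
        intro t ht1 ht2
        unfold pvRow0
        rw [h0get t (by omega) (by rw [hLrep]; omega)]
        unfold pvF
        by_cases h2 : 2 ≤ t
        · rw [if_pos ⟨by omega, by omega⟩, if_pos ⟨h2, by omega⟩]
          unfold pvC
          rw [if_pos ⟨le_rfl, by omega⟩, if_neg (by omega)]
          norm_num
          decide
        · rw [if_neg (by omega), if_neg (by omega), pvAGet_replicate]
          decide
      obtain ⟨hflen, hfget⟩ := pvFoldRows N hN2 (K - 2).toNat 1 le_rfl (pvRow0 N)
        hrow0len hrow0get
      rw [show (1 : Int) + ((K - 2).toNat : Int) = K - 1 by omega] at hflen hfget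
      have hlastget : ∀ t, 1 ≤ t → t ≤ N →
          pvAGet (pvLast N K) t 0 = pvF N (K - 2) t % pvMod := by
        intro t ht1 ht2
        have := hfget t ht1 ht2
        rw [show K - 1 - 1 = K - 2 by ring] at this
        exact this
      have hans : pvAnsA N K = pvS (pvF N (K - 2)) 2 (N + 1) % pvMod := by
        rw [show pvAnsA N K = (PySem.List.pyRange 2 (N + 1) 1).foldl
          (fun a j => (a + pvAGet (pvLast N K) j 0) % pvMod) 0 from rfl]
        have hfold := pvAnsFold (fun j => pvAGet (pvLast N K) j 0)
          (N + 1 - 2).toNat 2 0 (by decide)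
        rw [show (2 : Int) + ((N + 1 - 2).toNat : Int) = N + 1 by omega] at hfold
        rw [hfold]
        have hmod := pvS_mod (fun j => pvAGet (pvLast N K) j 0) (pvF N (K - 2)) 2 (N + 1)
          (by
            intro m hm1 hm2
            beta_reduce
            rw [hlastget m (by omega) (by omega)]
            unfold pvMod; omega)
        unfold pvMod at hmod ⊢
        omega
      by_cases hKN : K ≤ N
      · -- main case: the closed form
        rw [if_neg (by omega : ¬ (K < 2 ∨ N < K))]
        obtain ⟨hb1, hb2⟩ := pvBinom_vals N K hK2 hKN
        have hansB : pvAnsB N K = pvS (pvF N (K - 2)) 2 (N + 1) % pvMod := by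
          unfold pvAnsB pvB2
          rw [hb2, hb1, pvFinalSum N K hK2 hN2, if_pos (by omega)]
        have heq : pvAnsA N K = pvAnsB N K := by rw [hans, hansB]
        rw [heq]
      · -- K > N: A's sum vanishes, B returns 0
        rw [if_pos (by omega : K < 2 ∨ N < K)]
        have hzero : pvAnsA N K = 0 := by
          rw [hans, pvFinalSum N K hK2 hN2]
          by_cases hKN1 : K ≤ N + 1
          · rw [if_pos hKN1]
            have he : K = N + 1 := by omega
            have hsym : pvC (N + K - 2) (K - 1) = pvC (N + K - 2) (K - 2) := by
              have h := pvC_symm (N + K - 2) (K - 1) (by omega) (by omega)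
              rw [h, show N + K - 2 - (K - 1) = K - 2 by omega]
            rw [hsym]
            simp
          · rw [if_neg hKN1]
            simp
        rw [if_pos (show K ≠ N by omega), hzero]
        simp
    · -- N ≤ 1: A's ans loop is empty, B returns 0 (K < 2 or K > N ≥ here, K ≠ 1)
      have hzero : pvAnsA N K = 0 := by
        rw [show pvAnsA N K = (PySem.List.pyRange 2 (N + 1) 1).foldl
            (fun a j => (a + pvAGet (pvLast N K) j 0) % pvMod) 0 from rfl,
          PySem.List.pyRange_one_eq_nil (show N + 1 ≤ 2 by omega)]
        rfl
      rw [if_pos (show K < 2 ∨ N < K by omega)]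
      by_cases hKeq : K ≠ N
      · rw [if_pos hKeq, hzero]
        simp
      · rw [if_neg hKeq, hzero]
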